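-- pv_equiv track=rewrite | github.com/pratikshatabhane/RDAIreland | pyhton.py | first_unique_length_strings
-- ===== SOURCE A (Python) =====
-- def first_unique_length_strings(strings):
--     # Dictionary to store frequency of string lengths
--     length_freq = {}
--
--     # Iterate through the input array to count string lengths
--     for string in strings:
--         length = len(string)
--         if length in length_freq:
--             length_freq[length] += 1
--         else:
--             length_freq[length] = 1
--
--     # Iterate through the input array to find first occurred strings with unique lengths
--     result = []
--     for string in strings:
--         length = len(string)
--         if length_freq[length] == 1:
--             result.append(string)
--     return result
-- ===== SOURCE B (Python) =====
-- def first_unique_length_strings(strings):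
--     # Bucket the strings by length in one pass, then emit the element of
--     # every singleton bucket in insertion (first-occurrence-of-length) order.
--     buckets = {}
--     for s in strings:
--         buckets.setdefault(len(s), []).append(s)
--     return [g[0] for g in buckets.values() if len(g) == 1]
-- ===== Notes on version B (the rewrite author's own statement) =====
-- stated objective: alternative
-- what changed: Replaces A's two passes over the input (count lengths, then re-scan all strings testing each count) by a single grouping pass into length-keyed buckets followed by a pass over the buckets that emits each singleton bucket's element.
import Mathlib
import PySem

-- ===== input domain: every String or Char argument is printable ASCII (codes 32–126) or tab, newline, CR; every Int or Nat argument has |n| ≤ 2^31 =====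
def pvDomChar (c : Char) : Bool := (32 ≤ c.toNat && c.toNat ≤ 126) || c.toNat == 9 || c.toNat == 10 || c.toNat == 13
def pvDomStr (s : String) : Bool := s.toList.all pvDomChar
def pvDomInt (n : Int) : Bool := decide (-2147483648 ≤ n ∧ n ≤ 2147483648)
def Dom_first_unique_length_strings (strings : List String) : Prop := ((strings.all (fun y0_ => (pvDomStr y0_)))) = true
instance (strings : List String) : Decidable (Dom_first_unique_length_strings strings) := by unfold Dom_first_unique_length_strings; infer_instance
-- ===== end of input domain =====

-- B buckets the strings by length in one pass and emits each singleton bucket's element,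
-- instead of A's count-then-rescan two passes; objective: alternative decomposition, same cost.


-- ===== PORT A =====
def first_unique_length_strings (strings : List String) : List String :=
  let length_freq : PySem.Dict Int Int := strings.foldl
    (fun d s =>
      if d.contains (PySem.Str.len s) then d.modify (PySem.Str.len s) 0 (· + 1)
      else d.insert (PySem.Str.len s) 1)
    PySem.Dict.empty
  strings.foldl
    (fun result s =>
      if length_freq.getD (PySem.Str.len s) 0 == 1 then result ++ [s] else result) []

-- ===== PORT B =====
def first_unique_length_strings_alt (strings : List String) : List String :=
  let buckets : PySem.Dict Int (List String) := strings.foldl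
    (fun d s => d.modify (PySem.Str.len s) [] (· ++ [s])) PySem.Dict.empty
  buckets.values.foldl
    (fun res g => if g.length == 1 then res ++ [PySem.List.pyGetD g 0 ""] else res) []

-- ===== PRECONDITION & SPEC =====
def Spec_first_unique_length_strings (strings : List String) (out : List String) : Prop := out = first_unique_length_strings_alt strings
instance (strings : List String) (out : List String) : Decidable (Spec_first_unique_length_strings strings out) := by unfold Spec_first_unique_length_strings; infer_instance

-- ===== CLAIM (what is proved, stated in full; the proofs are below) =====
def Claim_equal_first_unique_length_strings : Prop := ∀ (strings : List String), Dom_first_unique_length_strings strings → Spec_first_unique_length_strings strings (first_unique_length_strings strings)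

-- ===== LEMMAS AND PROOFS =====

-- the uniqueness test both programs implement, as a Bool predicate on a string
def pvUniq (strings : List String) (s : String) : Bool :=
  strings.countP (fun t => PySem.Str.len t == PySem.Str.len s) == 1

-- A's result is the filter of the input by the uniqueness test
theorem pvA_eq_filter (strings : List String) :
    first_unique_length_strings strings = strings.filter (pvUniq strings) := by
  unfold first_unique_length_strings
  rw [PySem.List.foldl_append_if_eq_filter]
  have hstep : ∀ (d : PySem.Dict Int Int) (s : String), s ∈ strings →
      (if d.contains (PySem.Str.len s) then d.modify (PySem.Str.len s) 0 (· + 1)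
       else d.insert (PySem.Str.len s) 1)
      = d.modify (PySem.Str.len s) 0 (· + 1) := by
    intro d s _
    cases hc : d.contains (PySem.Str.len s) with
    | true => simp
    | false =>
      have hmod : d.modify (PySem.Str.len s) 0 (· + 1)
          = d.insert (PySem.Str.len s) (d.getD (PySem.Str.len s) 0 + 1) := rfl
      rw [hmod, PySem.Dict.getD_of_not_contains d 0 hc]
      simp
  rw [PySem.List.foldl_congr_mem strings _ _ PySem.Dict.empty hstep]
  simp only [List.nil_append]
  apply List.filter_congr
  intro s hs
  have hgd := PySem.Dict.getD_foldl_modify_add_one (strings.map PySem.Str.len)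
    PySem.Dict.empty (PySem.Str.len s)
  rw [List.foldl_map] at hgd
  rw [hgd]
  simp only [PySem.Dict.getD_empty, zero_add]
  have hcnt : (strings.map PySem.Str.len).count (PySem.Str.len s)
      = strings.countP (fun t => PySem.Str.len t == PySem.Str.len s) := by
    simp [List.count_eq_countP, List.countP_map, Function.comp_def]
  unfold pvUniq
  rw [hcnt]
  have hcast : ∀ n : Nat, ((n : Int) == 1) = (n == 1) := by
    intro n
    cases hn : n == 1
    · simpa using fun hh => (by simpa using hn : n ≠ 1) (by exact_mod_cast hh)
    · simp [show n = 1 by simpa using hn]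
  exact hcast _

-- first-occurrence dedup agrees with the raw list on predicates that only hold on count-≤1 elements
theorem pvOfList_filter {α : Type} [DecidableEq α] (L : List α) (acc : List α) (p : α → Bool)
    (h : ∀ k, p k = true → L.count k + acc.count k ≤ 1) :
    (L.foldl PySem.Set.add acc).filter p = acc.filter p ++ L.filter p := by
  induction L generalizing acc with
  | nil => simp
  | cons a L ih =>
    simp only [List.foldl_cons]
    by_cases hmem : a ∈ acc
    · have hna : p a = false := by
        cases hp : p a
        · rfl
        · exfalso
          have := h a hp
          have h1 : 1 ≤ (a :: L).count a := by simp
          have h2 : 1 ≤ acc.count a := List.one_le_count_iff.mpr hmem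
          omega
      have hadd : PySem.Set.add acc a = acc := by
        simp [PySem.Set.add, PySem.Set.contains, hmem]
      rw [hadd, ih acc (fun k hk => by
        have := h k hk
        simp only [List.count_cons] at this
        omega)]
      simp [hna]
    · have hadd : PySem.Set.add acc a = acc ++ [a] := by
        simp [PySem.Set.add, PySem.Set.contains, hmem]
      rw [hadd, ih (acc ++ [a]) (fun k hk => by
        have := h k hk
        simp only [List.count_cons, List.count_append] at this ⊢
        by_cases hka : k = a <;> simp [hka] at this ⊢ <;> omega)]
      cases hp : p a <;>
        simp [List.filter_append, hp, List.append_assoc]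

-- a filter of length one containing s is [s]
theorem pvFilter_singleton {α : Type} (l : List α) (q : α → Bool) (s : α)
    (hs : s ∈ l) (hq : q s = true) (hlen : (l.filter q).length = 1) :
    l.filter q = [s] := by
  have hmem : s ∈ l.filter q := List.mem_filter.mpr ⟨hs, hq⟩
  match hf : l.filter q with
  | [] => rw [hf] at hmem; cases hmem
  | [x] =>
    rw [hf] at hmem
    simp at hmem
    rw [hmem]
  | x :: y :: t => rw [hf] at hlen; simp at hlen

-- B's result is the same filter
theorem pvB_eq_filter (strings : List String) :
    first_unique_length_strings_alt strings = strings.filter (pvUniq strings) := by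
  unfold first_unique_length_strings_alt
  rw [PySem.List.foldl_append_if]
  simp only [List.nil_append]
  set buckets : PySem.Dict Int (List String) := strings.foldl
    (fun d s => d.modify (PySem.Str.len s) [] (· ++ [s])) PySem.Dict.empty with hb
  have hnodup : buckets.keys.Nodup := by
    rw [hb]
    exact PySem.Dict.nodup_keys_foldl_modify_key strings PySem.Str.len []
      (fun _ s => (· ++ [s])) PySem.Dict.empty (by simp)
  have hkeys : buckets.keys = PySem.Set.ofList (strings.map PySem.Str.len) := by
    rw [hb, PySem.Dict.keys_foldl_modify_key strings PySem.Str.len []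
      (fun _ s => (· ++ [s])) PySem.Dict.empty]
    simp [PySem.Set.update, PySem.Set.ofList_eq_foldl]
  have hgetD : ∀ c : Int, buckets.getD c [] = strings.filter (fun s => PySem.Str.len s == c) := by
    intro c
    rw [hb, show (strings.foldl (fun d s => d.modify (PySem.Str.len s) [] (· ++ [s]))
        PySem.Dict.empty)
      = ((strings.map (fun s => (PySem.Str.len s, s))).foldl
          (fun d p => d.modify p.1 [] (· ++ [p.2])) PySem.Dict.empty) from by
        rw [List.foldl_map]]
    rw [PySem.Dict.getD_foldl_modify_append]
    simp [List.filter_map, Function.comp_def, List.map_map]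
  have hvals : buckets.values = buckets.keys.map (fun k => buckets.getD k []) :=
    PySem.Dict.values_eq_map_keys buckets hnodup []
  rw [hvals, hkeys, List.filter_map, List.map_map]
  simp only [Function.comp_def]
  have hcntP : ∀ k : Int, (strings.map PySem.Str.len).count k
      = strings.countP (fun t => PySem.Str.len t == k) := by
    intro k
    simp [List.count_eq_countP, List.countP_map, Function.comp_def]
  have hfk : (PySem.Set.ofList (strings.map PySem.Str.len)).filter
        (fun k => (buckets.getD k []).length == 1)
      = (strings.map PySem.Str.len).filter (fun k => (buckets.getD k []).length == 1) := by
    rw [PySem.Set.ofList_eq_foldl]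
    have := pvOfList_filter (strings.map PySem.Str.len) []
      (fun k => (buckets.getD k []).length == 1) ?_
    · simpa using this
    · intro k hk
      simp only [hgetD k, beq_iff_eq] at hk
      have hc1 : strings.countP (fun s => PySem.Str.len s == k) = 1 := by
        rw [List.countP_eq_length_filter]
        exact hk
      simp only [List.count_nil, Nat.add_zero, hcntP k]
      exact le_of_eq hc1
  rw [hfk, List.filter_map, List.map_map]
  simp only [Function.comp_def]
  have hflt : (strings.filter (fun s => ((buckets.getD (PySem.Str.len s) []).length == 1)))
      = strings.filter (pvUniq strings) := by
    apply List.filter_congr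
    intro s hs
    rw [hgetD]
    unfold pvUniq
    rw [List.countP_eq_length_filter]
  rw [hflt]
  conv_rhs => rw [← List.map_id (strings.filter (pvUniq strings))]
  apply List.map_congr_left
  intro s hs
  have hs' := List.mem_filter.mp hs
  have hu : strings.countP (fun t => PySem.Str.len t == PySem.Str.len s) = 1 := by
    have := hs'.2
    unfold pvUniq at this
    simpa using this
  have hone : (strings.filter (fun t => PySem.Str.len t == PySem.Str.len s)) = [s] := by
    apply pvFilter_singleton _ _ _ hs'.1 (by simp)
    rw [← List.countP_eq_length_filter]
    exact hu
  have hbs : buckets.getD (PySem.Str.len s) [] = [s] := (hgetD _).trans hone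
  show PySem.List.pyGetD (buckets.getD (PySem.Str.len s) []) 0 "" = s
  rw [hbs]
  rfl

-- ===== VERDICT (by name: the statement is the Claim_ definition above) =====
theorem first_unique_length_strings_spec : Claim_equal_first_unique_length_strings := by
  intro strings _
  unfold Spec_first_unique_length_strings
  rw [pvA_eq_filter, pvB_eq_filter]
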